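-- pv_equiv track=rewrite | github.com/Hfreitas/sd-03-live-lectures | PYTHON/n_rainhas.py | verifica_diagonal_inferior_esquerda
-- ===== SOURCE A (Python) =====
-- def verifica_diagonal_inferior_esquerda(atacante, vitima):
--     proxima_posicao = {
--         "linha": atacante["linha"] + 1,
--         "coluna": atacante["coluna"] - 1,
--     }
--     while esta_dentro_do_tabuleiro(
--         proxima_posicao["linha"], proxima_posicao["coluna"]
--     ):
--         if (
--             proxima_posicao["linha"] == vitima["linha"]
--             and proxima_posicao["coluna"] == vitima["coluna"]
--         ):
--             return True
--         proxima_posicao["linha"] += 1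
--         proxima_posicao["coluna"] -= 1
--     return False
--
-- def esta_dentro_do_tabuleiro(linha, coluna):
--     return 0 <= linha <= 7 and 0 <= coluna <= 7
-- ===== SOURCE B (Python) =====
-- def esta_dentro_do_tabuleiro(linha, coluna):
--     return 0 <= linha <= 7 and 0 <= coluna <= 7
--
--
-- def verifica_diagonal_inferior_esquerda(atacante, vitima):
--     # closed-form test instead of scanning the diagonal cell by cell
--     if not esta_dentro_do_tabuleiro(atacante["linha"] + 1, atacante["coluna"] - 1):
--         return False
--     d = vitima["linha"] - atacante["linha"]
--     return (
--         d >= 1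
--         and vitima["coluna"] == atacante["coluna"] - d
--         and esta_dentro_do_tabuleiro(vitima["linha"], vitima["coluna"])
--     )
-- ===== Notes on version B (the rewrite author's own statement) =====
-- stated objective: simpler
-- what changed: Replaced the while-loop that walks the lower-left diagonal cell by cell with a single closed-form arithmetic test (offset d = vitima['linha'] - atacante['linha'], column check, plus board-membership of the first step and the victim).
-- outside the precondition, e.g. on verifica_diagonal_inferior_esquerda({'linha': 0, 'coluna': 2}, {'linha': 5}): A returns False, B raises KeyError
import Mathlib
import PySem

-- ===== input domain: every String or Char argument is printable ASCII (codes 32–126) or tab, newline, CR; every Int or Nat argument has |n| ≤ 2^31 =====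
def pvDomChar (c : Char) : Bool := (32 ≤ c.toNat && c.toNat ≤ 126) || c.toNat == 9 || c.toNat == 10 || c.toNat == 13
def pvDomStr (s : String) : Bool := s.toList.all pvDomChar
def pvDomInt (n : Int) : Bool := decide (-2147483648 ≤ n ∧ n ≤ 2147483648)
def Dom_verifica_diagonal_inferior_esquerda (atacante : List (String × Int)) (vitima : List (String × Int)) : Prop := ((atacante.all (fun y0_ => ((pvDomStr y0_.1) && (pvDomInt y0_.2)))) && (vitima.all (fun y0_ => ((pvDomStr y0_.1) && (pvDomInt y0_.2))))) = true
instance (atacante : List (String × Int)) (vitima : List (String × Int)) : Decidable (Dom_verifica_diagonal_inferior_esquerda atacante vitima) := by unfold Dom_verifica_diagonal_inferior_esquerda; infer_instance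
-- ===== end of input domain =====

-- B replaces A's cell-by-cell diagonal while-scan with a single closed-form arithmetic
-- test (objective: simpler). Equality is on the RETURN value; neither version mutates input.

-- ===== PORT A =====

-- dict lookup (first match in the association list); d[k], none = KeyError
def pvLookup (d : List (String × Int)) (k : String) : Option Int :=
  (d.find? (fun p => p.1 == k)).map (·.2)

def esta_dentro_do_tabuleiro (linha : Int) (coluna : Int) : Bool :=
  (decide (0 ≤ linha) && decide (linha ≤ 7)) && (decide (0 ≤ coluna) && decide (coluna ≤ 7))

-- the while-loop of A, state = proxima_posicao (linha, coluna)
def loopA (linha coluna vl vc : Int) : Bool :=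
  if h : esta_dentro_do_tabuleiro linha coluna = true then
    if linha = vl ∧ coluna = vc then true
    else loopA (linha + 1) (coluna - 1) vl vc
  else false
  termination_by (8 - linha).toNat
  decreasing_by
    simp [esta_dentro_do_tabuleiro] at h
    omega

-- under Pre_ the `none` fallbacks (Python: KeyError) are unreachable except the
-- vitima one with the first step off-board, where the loop body never runs (False)
def verifica_diagonal_inferior_esquerda (atacante : List (String × Int)) (vitima : List (String × Int)) : Bool :=
  match pvLookup atacante "linha", pvLookup atacante "coluna" with
  | some al, some ac =>
    match pvLookup vitima "linha", pvLookup vitima "coluna" with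
    | some vl, some vc => loopA (al + 1) (ac - 1) vl vc
    | _, _ => false
  | _, _ => false

-- ===== PORT B =====
-- B-side copies of the helpers (kept separate from A's)
def pvLookupB (d : List (String × Int)) (k : String) : Option Int :=
  (d.find? (fun p => p.1 == k)).map (·.2)

def esta_dentro_do_tabuleiro_b (linha : Int) (coluna : Int) : Bool :=
  (decide (0 ≤ linha) && decide (linha ≤ 7)) && (decide (0 ≤ coluna) && decide (coluna ≤ 7))

def verifica_diagonal_inferior_esquerda_alt (atacante : List (String × Int)) (vitima : List (String × Int)) : Bool :=
  (pvLookupB atacante "linha").elim false (fun al =>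
    (pvLookupB atacante "coluna").elim false (fun ac =>
      if esta_dentro_do_tabuleiro_b (al + 1) (ac - 1) = false then false
      else
        (pvLookupB vitima "linha").elim false (fun vl =>
          (pvLookupB vitima "coluna").elim false (fun vc =>
            decide (vl - al ≥ 1) && decide (vc = ac - (vl - al)) && esta_dentro_do_tabuleiro_b vl vc))))

-- ===== PRECONDITION & SPEC =====
-- Pre_ excludes the KeyError inputs of either program: atacante must carry both keys, and
-- vitima must carry both whenever the first diagonal step is on the board (off the board
-- neither program ever reads vitima). This also excludes a few inputs where A happens to
-- return False because its short-circuit never reads vitima's missing "coluna" key while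
-- B's short-circuit does read it and raises; when the victim row is not below the attacker
-- (d < 1) neither program reads the missing "coluna", so such inputs stay inside Pre_.
def Pre_verifica_diagonal_inferior_esquerda (atacante : List (String × Int)) (vitima : List (String × Int)) : Prop :=
  ((atacante.find? (fun p => p.1 == "linha")).isSome ∧ (atacante.find? (fun p => p.1 == "coluna")).isSome) ∧
  ((0 ≤ ((atacante.find? (fun p => p.1 == "linha")).map (·.2)).getD 0 + 1 ∧
    ((atacante.find? (fun p => p.1 == "linha")).map (·.2)).getD 0 + 1 ≤ 7 ∧
    0 ≤ ((atacante.find? (fun p => p.1 == "coluna")).map (·.2)).getD 0 - 1 ∧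
    ((atacante.find? (fun p => p.1 == "coluna")).map (·.2)).getD 0 - 1 ≤ 7) →
   ((vitima.find? (fun p => p.1 == "linha")).isSome ∧
    ((vitima.find? (fun p => p.1 == "coluna")).isSome ∨
     ((vitima.find? (fun p => p.1 == "linha")).map (·.2)).getD 0 ≤
       ((atacante.find? (fun p => p.1 == "linha")).map (·.2)).getD 0)))
instance (atacante : List (String × Int)) (vitima : List (String × Int)) : Decidable (Pre_verifica_diagonal_inferior_esquerda atacante vitima) := by unfold Pre_verifica_diagonal_inferior_esquerda; infer_instance

def pvWitness_verifica_diagonal_inferior_esquerda : (List (String × Int)) × (List (String × Int)) :=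
  ([("linha", 0), ("coluna", 2)], [("linha", 1), ("coluna", 1)])

def Spec_verifica_diagonal_inferior_esquerda (atacante : List (String × Int)) (vitima : List (String × Int)) (out : Bool) : Prop := out = verifica_diagonal_inferior_esquerda_alt atacante vitima
instance (atacante : List (String × Int)) (vitima : List (String × Int)) (out : Bool) : Decidable (Spec_verifica_diagonal_inferior_esquerda atacante vitima out) := by unfold Spec_verifica_diagonal_inferior_esquerda; infer_instance

-- ===== CLAIM (what is proved, stated in full; the proofs are below) =====
def Claim_equal_verifica_diagonal_inferior_esquerda : Prop := ∀ (atacante : List (String × Int)) (vitima : List (String × Int)), Dom_verifica_diagonal_inferior_esquerda atacante vitima → Pre_verifica_diagonal_inferior_esquerda atacante vitima → Spec_verifica_diagonal_inferior_esquerda atacante vitima (verifica_diagonal_inferior_esquerda atacante vitima)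

-- ===== LEMMAS AND PROOFS =====

-- characterisation of A's while-loop by the closed form B uses
theorem loopA_eq (linha coluna vl vc : Int) :
    loopA linha coluna vl vc =
      (esta_dentro_do_tabuleiro linha coluna &&
       (decide (linha ≤ vl) && decide (vc = coluna - (vl - linha)) && esta_dentro_do_tabuleiro vl vc)) := by
  rw [loopA]
  split_ifs with h h2
  · -- guard true, found victim
    obtain ⟨h1, h2'⟩ := h2
    subst h1; subst h2'
    simp only [esta_dentro_do_tabuleiro, Bool.and_eq_true, decide_eq_true_eq] at h
    simp only [esta_dentro_do_tabuleiro, ← Bool.decide_and]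
    symm
    rw [decide_eq_true_eq]
    omega
  · -- guard true, step onwards
    rw [loopA_eq]
    simp only [esta_dentro_do_tabuleiro, Bool.and_eq_true, decide_eq_true_eq] at h
    simp only [esta_dentro_do_tabuleiro, ← Bool.decide_and, decide_eq_decide]
    omega
  · -- guard false
    simp only [Bool.not_eq_true] at h
    simp [h]
  termination_by (8 - linha).toNat
  decreasing_by
    simp [esta_dentro_do_tabuleiro] at h
    omega

-- ===== VERDICT (by name: the statement is the Claim_ definition above) =====
theorem verifica_diagonal_inferior_esquerda_spec : Claim_equal_verifica_diagonal_inferior_esquerda := by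
  intro atacante vitima _ hpre
  unfold Spec_verifica_diagonal_inferior_esquerda
  unfold verifica_diagonal_inferior_esquerda verifica_diagonal_inferior_esquerda_alt
  obtain ⟨⟨hal, hac⟩, himpl⟩ := hpre
  obtain ⟨pa, hpa⟩ := Option.isSome_iff_exists.mp hal
  obtain ⟨pc, hpc⟩ := Option.isSome_iff_exists.mp hac
  simp only [pvLookup, pvLookupB, hpa, hpc, Option.map_some, Option.elim_some]
  have hbe : ∀ l c, esta_dentro_do_tabuleiro_b l c = esta_dentro_do_tabuleiro l c := fun _ _ => rfl
  simp only [hbe]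
  rcases hinb : esta_dentro_do_tabuleiro (pa.2 + 1) (pc.2 - 1) with _ | _
  · -- first step off the board: A's loop exits at once, B short-circuits
    rcases hvl : List.find? (fun p => p.1 == "linha") vitima with _ | pv <;>
      rcases hvc : List.find? (fun p => p.1 == "coluna") vitima with _ | qv <;>
      simp [hvl, hvc, hinb, loopA_eq]
  · -- first step on the board: Pre_ forces vitima's keys to be present
    have hv := himpl (by
      simp only [esta_dentro_do_tabuleiro, Bool.and_eq_true, decide_eq_true_eq] at hinb
      simp only [hpa, hpc, Option.map_some, Option.getD_some]
      omega)
    obtain ⟨pv, hpv⟩ := Option.isSome_iff_exists.mp hv.1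
    rcases hpq : List.find? (fun p => p.1 == "coluna") vitima with _ | qv
    · -- vitima has no "coluna": neither program ever reads it (A finds no row match, B has d < 1)
      simp [hpv, hpq]
    · simp only [hpv, hpq, Option.map_some, Option.elim_some, Bool.true_eq_false, ite_false]
      rw [loopA_eq, hinb]
      simp only [Bool.true_and]
      simp only [esta_dentro_do_tabuleiro, ← Bool.decide_and, decide_eq_decide]
      omega
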